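-- pv_equiv track=rewrite | github.com/gereleth/aoc_python | src/year2023/day15.py | holiday_ascii_hash
-- ===== SOURCE A (Python) =====
-- def holiday_ascii_hash(text):
--     res = 0
--     for char in text:
--         if char == "\n":
--             continue
--         n = ord(char)
--         res += n
--         res *= 17
--         res = res % 256
--     return res
-- ===== SOURCE B (Python) =====
-- def holiday_ascii_hash(text):
--     # Closed-form weights: since 17 = 1 + 16 and 16*16 = 256, we have
--     # 17**e % 256 == (1 + 16*e) % 256.  The rolling hash therefore equals
--     # sum(code * (1 + 16*e)) % 256, where e counts down from the number of
--     # non-newline characters to 1 -- one multiply-add per char, one mod at the end.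
--     codes = [ord(c) for c in text if c != "\n"]
--     total = 0
--     e = len(codes)
--     for n in codes:
--         total += n * (1 + 16 * e)
--         e -= 1
--     return total % 256
-- ===== Notes on version B (the rewrite author's own statement) =====
-- stated objective: alternative
-- what changed: Replaces the per-character rolling (acc+n)*17 % 256 update with closed-form weights derived from 17^e mod 256 = (1+16e) mod 256: one multiply-add per character and a single final mod.
import Mathlib
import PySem

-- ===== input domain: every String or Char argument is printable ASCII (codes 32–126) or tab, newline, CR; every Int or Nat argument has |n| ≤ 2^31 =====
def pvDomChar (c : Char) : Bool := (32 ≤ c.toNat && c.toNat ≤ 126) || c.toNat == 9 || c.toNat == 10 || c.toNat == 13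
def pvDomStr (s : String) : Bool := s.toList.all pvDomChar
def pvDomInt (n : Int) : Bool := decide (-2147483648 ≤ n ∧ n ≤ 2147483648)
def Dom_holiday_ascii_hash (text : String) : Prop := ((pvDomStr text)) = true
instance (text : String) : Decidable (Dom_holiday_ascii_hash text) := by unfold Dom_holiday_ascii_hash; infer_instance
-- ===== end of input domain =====

-- B replaces A's rolling (acc+n)*17 % 256 update with closed-form per-character
-- weights (17^e mod 256 = (1+16e) mod 256): one multiply-add per char, single final mod.

-- ===== PORT A =====
def holiday_ascii_hash (text : String) : Int :=
  text.toList.foldl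
    (fun res char =>
      if char = '\n' then res
      else PySem.Int.mod ((res + (char.toNat : Int)) * 17) 256)
    0

-- ===== PORT B =====
def holiday_ascii_hash_alt (text : String) : Int :=
  let codes : List Int := (text.toList.filter (fun c => c ≠ '\n')).map (fun c => (c.toNat : Int))
  let r := codes.foldl
    (fun (p : Int × Int) n => (p.1 + n * (1 + 16 * p.2), p.2 - 1))
    (0, (codes.length : Int))
  PySem.Int.mod r.1 256

-- ===== PRECONDITION & SPEC =====
def Spec_holiday_ascii_hash (text : String) (out : Int) : Prop := out = holiday_ascii_hash_alt text
instance (text : String) (out : Int) : Decidable (Spec_holiday_ascii_hash text out) := by unfold Spec_holiday_ascii_hash; infer_instance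

-- ===== CLAIM (what is proved, stated in full; the proofs are below) =====
def Claim_equal_holiday_ascii_hash : Prop := ∀ (text : String), Dom_holiday_ascii_hash text → Spec_holiday_ascii_hash text (holiday_ascii_hash text)

-- ===== LEMMAS AND PROOFS =====

-- A's fold restricted to the pre-extracted code list (pure Int fold).
def pvG (l : List Int) (acc : Int) : Int :=
  l.foldl (fun res n => ((res + n) * 17) % 256) acc

-- weighted sum with exponents counting down to 1
def pvW : List Int → Int
  | [] => 0
  | n :: t => n * 17 ^ (t.length + 1) + pvW t

theorem pv_pow17 (e : ℕ) : ((17:ℤ) ^ e) % 256 = (1 + 16 * (e:ℤ)) % 256 := by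
  induction e with
  | zero => norm_num
  | succ k ih =>
    have h : (17:ℤ) ^ (k+1) = 17 ^ k * 17 := by ring
    have : ((17:ℤ) ^ k * 17) % 256 = ((1 + 16 * (k:ℤ)) * 17) % 256 := by
      have := Int.ModEq.mul_right 17 (ih : (17:ℤ)^k ≡ 1 + 16*(k:ℤ) [ZMOD 256])
      exact this
    rw [h, this]
    have : ((1 + 16 * (k:ℤ)) * 17) % 256 = (17 + 272 * (k:ℤ)) % 256 := by ring_nf
    rw [this]
    have : (17 + 272 * (k:ℤ)) ≡ (1 + 16 * ((k:ℤ) + 1)) [ZMOD 256] := by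
      unfold Int.ModEq
      omega
    have h2 := this
    push_cast
    omega

theorem pvG_modeq (l : List Int) (acc : Int) :
    pvG l acc ≡ acc * 17 ^ l.length + pvW l [ZMOD 256] := by
  induction l generalizing acc with
  | nil => simp [pvG, pvW]
  | cons n t ih =>
    have step : pvG (n :: t) acc = pvG t (((acc + n) * 17) % 256) := rfl
    rw [step]
    calc pvG t (((acc + n) * 17) % 256)
        ≡ ((acc + n) * 17) % 256 * 17 ^ t.length + pvW t [ZMOD 256] := ih _
      _ ≡ (acc + n) * 17 * 17 ^ t.length + pvW t [ZMOD 256] := by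
          exact Int.ModEq.add_right _ (Int.ModEq.mul_right _ (Int.emod_emod_of_dvd _ dvd_rfl))
      _ = acc * 17 ^ (t.length + 1) + (n * 17 ^ (t.length + 1) + pvW t) := by ring
      _ = acc * 17 ^ (n :: t).length + pvW (n :: t) := by simp [pvW]

theorem pvG_self_mod (l : List Int) (acc : Int) (h : acc % 256 = acc) :
    pvG l acc % 256 = pvG l acc := by
  induction l generalizing acc with
  | nil => simpa [pvG] using h
  | cons n t ih =>
    have step : pvG (n :: t) acc = pvG t (((acc + n) * 17) % 256) := rfl
    rw [step]
    exact ih _ (Int.emod_emod_of_dvd _ dvd_rfl)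

-- A's char fold equals the pure fold over the extracted codes.
theorem pvA_eq_pvG (l : List Char) (acc : Int) :
    l.foldl (fun res char =>
        if char = '\n' then res
        else PySem.Int.mod ((res + (char.toNat : Int)) * 17) 256) acc
    = pvG ((l.filter (fun c => c ≠ '\n')).map (fun c => (c.toNat : Int))) acc := by
  induction l generalizing acc with
  | nil => rfl
  | cons c t ih =>
    by_cases h : c = '\n'
    · simpa [List.filter_cons, h] using ih acc
    · have hm : PySem.Int.mod ((acc + (c.toNat : Int)) * 17) 256
          = ((acc + (c.toNat : Int)) * 17) % 256 :=
        PySem.Int.mod_eq_emod_of_pos (by norm_num)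
      simp only [List.foldl_cons, if_neg h, hm, List.filter_cons]
      simpa [pvG, h] using ih (((acc + (c.toNat : Int)) * 17) % 256)

-- B's pair fold computes the weighted sum with (1+16e) weights, e counting down.
theorem pvB_fold (l : List Int) (t : Int) :
    (l.foldl (fun (p : Int × Int) n => (p.1 + n * (1 + 16 * p.2), p.2 - 1))
      (t, (l.length : Int))).1 ≡ t + pvW l [ZMOD 256] := by
  induction l generalizing t with
  | nil => simp [pvW]
  | cons n s ih =>
    have step :
        (((n :: s).foldl (fun (p : Int × Int) m => (p.1 + m * (1 + 16 * p.2), p.2 - 1))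
          (t, ((n :: s).length : Int))))
        = (s.foldl (fun (p : Int × Int) m => (p.1 + m * (1 + 16 * p.2), p.2 - 1))
          (t + n * (1 + 16 * (((n :: s).length : Int))), (s.length : Int))) := by
      simp
    rw [step]
    calc (s.foldl (fun (p : Int × Int) m => (p.1 + m * (1 + 16 * p.2), p.2 - 1))
          (t + n * (1 + 16 * (((n :: s).length : Int))), (s.length : Int))).1
        ≡ t + n * (1 + 16 * (((n :: s).length : Int))) + pvW s [ZMOD 256] := ih _
      _ ≡ t + n * 17 ^ (s.length + 1) + pvW s [ZMOD 256] := by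
          have hp : ((17:ℤ) ^ (s.length + 1)) ≡ 1 + 16 * ((s.length:ℤ) + 1) [ZMOD 256] := by
            have := pv_pow17 (s.length + 1)
            unfold Int.ModEq
            push_cast at this ⊢
            omega
          have := Int.ModEq.add_right (pvW s)
            (Int.ModEq.add_left t (Int.ModEq.mul_left n hp.symm))
          simpa [List.length_cons, mul_comm] using this
      _ = t + (n * 17 ^ (s.length + 1) + pvW s) := by ring
      _ = t + pvW (n :: s) := by simp [pvW]

-- ===== VERDICT (by name: the statement is the Claim_ definition above) =====
theorem holiday_ascii_hash_spec : Claim_equal_holiday_ascii_hash := by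
  intro text _
  unfold Spec_holiday_ascii_hash holiday_ascii_hash holiday_ascii_hash_alt
  set codes : List Int := (text.toList.filter (fun c => c ≠ '\n')).map (fun c => (c.toNat : Int)) with hc
  rw [pvA_eq_pvG, ← hc]
  have hA : pvG codes 0 ≡ pvW codes [ZMOD 256] := by
    simpa using pvG_modeq codes 0
  have hB := pvB_fold codes 0
  have hm : PySem.Int.mod
      ((codes.foldl (fun (p : Int × Int) n => (p.1 + n * (1 + 16 * p.2), p.2 - 1))
        (0, (codes.length : Int))).1) 256
      = ((codes.foldl (fun (p : Int × Int) n => (p.1 + n * (1 + 16 * p.2), p.2 - 1))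
        (0, (codes.length : Int))).1) % 256 :=
    PySem.Int.mod_eq_emod_of_pos (by norm_num)
  have hself := pvG_self_mod codes 0 (by norm_num)
  have : pvG codes 0 % 256
      = ((codes.foldl (fun (p : Int × Int) n => (p.1 + n * (1 + 16 * p.2), p.2 - 1))
        (0, (codes.length : Int))).1) % 256 := by
    have := hA.trans (by simpa using hB.symm)
    exact this
  simp only [hm]
  rw [← this, hself]
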